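-- pv_equiv track=rewrite | github.com/mr-holodok/MyKNUCryptoLabs | CryptoLab2/CryptoLab2.py | EncodeRotationCross
-- ===== SOURCE A (Python) =====
-- def EncodeRotationCross(msg:str) -> str:
--     mod = len(msg) % 16
--     if mod != 0:
--         msg += (16 - mod) * '*'
--     encoded = list(msg)
--     masks = list()
--     masks.append([0, 2, 9, 11])
--     masks.append([1, 3, 8, 10])
--     masks.append([4, 6, 13, 15])
--     masks.append([5, 7, 12, 14])
--     msgInd = 0
--     for tableInd in range(0, len(msg) // 16):
--         for maskIndexes in masks:
--             for maskIndex in maskIndexes: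
--                 encoded[tableInd * 16 + maskIndex] = msg[msgInd]
--                 msgInd += 1
--     encodedStr = str()
--     for i in range(0, len(encoded)):
--         encodedStr += encoded[i]
--     return encodedStr
-- ===== SOURCE B (Python) =====
-- # Inverse-permutation gather: instead of scattering msg[k] into output slot P[k]
-- # block by block, precompute the inverse table and pull each output character
-- # directly from its source offset, joining once.
-- _INV = [0, 4, 1, 5, 8, 12, 9, 13, 6, 2, 7, 3, 14, 10, 15, 11]
--
-- def EncodeRotationCross(msg: str) -> str:
--     r = len(msg) % 16
--     if r != 0:
--         msg += (16 - r) * '*'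
--     return ''.join(msg[16 * b + i] for b in range(len(msg) // 16) for i in _INV)
-- ===== Notes on version B (the rewrite author's own statement) =====
-- stated objective: idiomatic
-- what changed: A scatter-assigns each source character into a mutable list slot via the forward mask order and then rebuilds the string with character-by-character concatenation; B precomputes the inverse permutation table and builds the result as a single join that gathers each output position directly from its source offset.
import Mathlib
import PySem

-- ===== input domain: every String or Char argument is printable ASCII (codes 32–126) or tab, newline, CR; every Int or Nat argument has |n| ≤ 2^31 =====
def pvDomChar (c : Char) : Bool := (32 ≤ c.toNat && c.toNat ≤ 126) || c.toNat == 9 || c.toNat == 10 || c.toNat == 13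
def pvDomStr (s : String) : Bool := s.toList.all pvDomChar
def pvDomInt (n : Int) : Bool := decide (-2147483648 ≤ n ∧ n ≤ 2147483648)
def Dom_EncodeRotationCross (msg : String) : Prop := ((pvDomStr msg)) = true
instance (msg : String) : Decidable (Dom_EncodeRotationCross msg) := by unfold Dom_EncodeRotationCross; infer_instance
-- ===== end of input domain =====

-- B replaces A's per-block scatter into a mutable list (and char-by-char string
-- rebuild) by a single gather/join driven by the precomputed inverse permutation
-- table; the return values agree on all inputs.

-- ===== PORT A =====
def pvMasks : List (List Int) := [[0, 2, 9, 11], [1, 3, 8, 10], [4, 6, 13, 15], [5, 7, 12, 14]]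

-- literal port of A: pad with '*', scatter msg[msgInd] into encoded[16*tableInd+maskIndex],
-- then rebuild the string character by character.  The pyGetD defaults '*' are never
-- reached: every index stays in range (the equivalence proof below shows this), and
-- Python raises nowhere, so there is no Pre_.
def EncodeRotationCross (msg : String) : String :=
  let cs := msg.toList
  let m : Int := PySem.Int.mod (cs.length : Int) 16
  let padded := if m ≠ 0 then cs ++ List.replicate (16 - m).toNat '*' else cs
  let res := (PySem.List.pyRange 0 (PySem.Int.floordiv (padded.length : Int) 16) 1).foldl
    (fun st tableInd => pvMasks.foldl (fun st maskIndexes =>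
      maskIndexes.foldl (fun st maskIndex =>
        (PySem.List.pySetD st.1 (tableInd * 16 + maskIndex)
          (PySem.List.pyGetD padded st.2 '*'), st.2 + 1)) st) st)
    (padded, (0 : Int))
  String.ofList ((PySem.List.pyRange 0 (res.1.length : Int) 1).foldl
    (fun acc i => acc ++ [PySem.List.pyGetD res.1 i '*']) [])

-- ===== PORT B =====
def pvInv : List Int := [0, 4, 1, 5, 8, 12, 9, 13, 6, 2, 7, 3, 14, 10, 15, 11]

-- literal port of B: same padding, then one join gathering msg[16*b + inv[p]].
def EncodeRotationCross_alt (msg : String) : String :=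
  let cs := msg.toList
  let r : Int := PySem.Int.mod (cs.length : Int) 16
  let padded := if r ≠ 0 then cs ++ List.replicate (16 - r).toNat '*' else cs
  String.ofList ((PySem.List.pyRange 0 (PySem.Int.floordiv (padded.length : Int) 16) 1).flatMap
    (fun b => pvInv.map (fun i => PySem.List.pyGetD padded (16 * b + i) '*')))

-- ===== PRECONDITION & SPEC =====
def Spec_EncodeRotationCross (msg : String) (out : String) : Prop := out = EncodeRotationCross_alt msg
instance (msg : String) (out : String) : Decidable (Spec_EncodeRotationCross msg out) := by unfold Spec_EncodeRotationCross; infer_instance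

-- ===== CLAIM (what is proved, stated in full; the proofs are below) =====
def Claim_equal_EncodeRotationCross : Prop := ∀ (msg : String), Dom_EncodeRotationCross msg → Spec_EncodeRotationCross msg (EncodeRotationCross msg)

-- ===== LEMMAS AND PROOFS =====

-- the common block permutation of consecutive 16-chunks, as a recursion on chunks
def pvG : List Char → List Char
  | c0::c1::c2::c3::c4::c5::c6::c7::c8::c9::c10::c11::c12::c13::c14::c15::t =>
      c0::c4::c1::c5::c8::c12::c9::c13::c6::c2::c7::c3::c14::c10::c15::c11:: pvG t
  | _ => []

lemma readApp (q l : List Char) (k : Int) (d : Char) (hk : 0 ≤ k) :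
    PySem.List.pyGetD (q ++ l) ((q.length : Int) + k) d = l.getD k.toNat d := by
  obtain ⟨n, rfl⟩ := Int.eq_ofNat_of_zero_le hk
  by_cases h : n < l.length
  · rw [show ((q.length : Int) + n) = ((q.length + n : Nat) : Int) by push_cast; ring,
        PySem.List.pyGetD_ofNat _ _ _ (by simp; omega)]
    rw [List.getElem_append_right (by omega), List.getD_eq_getElem _ _ (by omega)]
    congr 1; omega
  · have h1 : (0:Int) ≤ (q.length : Int) + (n : Int) := by positivity
    simp [PySem.List.pyGetD, PySem.List.pyGet?, PySem.List.pyIdx?, h1, h, List.getD]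

lemma readApp' (q l : List Char) (k : Int) (d : Char) (hk : 0 ≤ k) :
    PySem.List.pyGetD (q ++ l) (k + (q.length : Int)) d = l.getD k.toNat d := by
  rw [add_comm]; exact readApp q l k d hk

lemma setHelp (p l : List Char) (k : Int) (v : Char) (hk : 0 ≤ k) :
    PySem.List.pySetD (p ++ l) ((p.length : Int) + k) v = p ++ l.set k.toNat v := by
  rw [PySem.List.pySetD_of_nonneg (p ++ l) v (by positivity)]
  rw [show ((p.length : Int) + k).toNat = p.length + k.toNat by omega]
  simp

lemma chunk16 (l : List Char) (n : Nat) (h : l.length = 16*(n+1)) :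
    ∃ c0 c1 c2 c3 c4 c5 c6 c7 c8 c9 c10 c11 c12 c13 c14 c15 t,
      l = c0::c1::c2::c3::c4::c5::c6::c7::c8::c9::c10::c11::c12::c13::c14::c15::t ∧
      t.length = 16*n := by
  rcases l with _|⟨c0,_|⟨c1,_|⟨c2,_|⟨c3,_|⟨c4,_|⟨c5,_|⟨c6,_|⟨c7,_|⟨c8,_|⟨c9,_|⟨c10,_|⟨c11,_|⟨c12,_|⟨c13,_|⟨c14,_|⟨c15,t⟩⟩⟩⟩⟩⟩⟩⟩⟩⟩⟩⟩⟩⟩⟩⟩ <;>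
    simp only [List.length_cons, List.length_nil] at h <;>
    first
      | (exfalso; omega)
      | exact ⟨c0,c1,c2,c3,c4,c5,c6,c7,c8,c9,c10,c11,c12,c13,c14,c15,t, rfl, by omega⟩

set_option maxHeartbeats 2000000 in
lemma oneBlock (a : Nat) (p q t : List Char)
    (c0 c1 c2 c3 c4 c5 c6 c7 c8 c9 c10 c11 c12 c13 c14 c15 : Char)
    (hp : p.length = 16*a) (hq : q.length = 16*a) :
    pvMasks.foldl (fun st maskIndexes =>
      maskIndexes.foldl (fun st maskIndex =>
        (PySem.List.pySetD st.1 ((a : Int) * 16 + maskIndex)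
          (PySem.List.pyGetD (q ++ (c0::c1::c2::c3::c4::c5::c6::c7::c8::c9::c10::c11::c12::c13::c14::c15::t)) st.2 '*'), st.2 + 1)) st)
      ((p ++ (c0::c1::c2::c3::c4::c5::c6::c7::c8::c9::c10::c11::c12::c13::c14::c15::t)), ((16*a : Nat) : Int))
    = (p ++ (c0::c4::c1::c5::c8::c12::c9::c13::c6::c2::c7::c3::c14::c10::c15::c11::t), ((16*a+16 : Nat) : Int)) := by
  simp only [pvMasks, List.foldl]
  norm_num
  rw [show ((a : Int) * 16) = (p.length : Int) by rw [hp]; push_cast; ring,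
      show ((16 : Int) * (a : Int)) = (q.length : Int) by rw [hq]; push_cast; ring]
  simp [setHelp, readApp]
  ring_nf
  simp [readApp']

set_option maxHeartbeats 2000000 in
lemma aLoop (n : Nat) : ∀ (a : Nat) (p q rest : List Char),
    p.length = 16*a → q.length = 16*a → rest.length = 16*n →
    (PySem.List.pyRange (a:Int) ((a:Int)+(n:Int)) 1).foldl
      (fun st tableInd => pvMasks.foldl (fun st maskIndexes =>
        maskIndexes.foldl (fun st maskIndex =>
          (PySem.List.pySetD st.1 (tableInd * 16 + maskIndex)
            (PySem.List.pyGetD (q ++ rest) st.2 '*'), st.2 + 1)) st) st)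
      (p ++ rest, ((16*a : Nat) : Int))
    = (p ++ pvG rest, ((16*(a+n) : Nat) : Int)) := by
  induction n with
  | zero =>
    intro a p q rest hp hq hr
    rw [List.length_eq_zero_iff] at hr
    subst hr
    rw [PySem.List.pyRange_one_eq_nil (by omega)]
    simp [pvG]
  | succ n ih =>
    intro a p q rest hp hq hr
    obtain ⟨c0,c1,c2,c3,c4,c5,c6,c7,c8,c9,c10,c11,c12,c13,c14,c15,t, rfl, ht⟩ := chunk16 rest n hr
    rw [PySem.List.pyRange_one_cons (by push_cast; omega), List.foldl_cons]
    rw [show (PySem.List.pyRange ((a:Int)+1) ((a:Int)+((n+1 : Nat) : Int)))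
          = PySem.List.pyRange (((a+1 : Nat)) : Int) ((((a+1 : Nat)) : Int)+(n : Int)) by
        push_cast; ring_nf]
    have hblk := oneBlock a p q t c0 c1 c2 c3 c4 c5 c6 c7 c8 c9 c10 c11 c12 c13 c14 c15 hp hq
    rw [hblk]
    have hperm : p ++ (c0::c4::c1::c5::c8::c12::c9::c13::c6::c2::c7::c3::c14::c10::c15::c11::t)
        = (p ++ [c0,c4,c1,c5,c8,c12,c9,c13,c6,c2,c7,c3,c14,c10,c15,c11]) ++ t := by simp
    have hsrc : q ++ (c0::c1::c2::c3::c4::c5::c6::c7::c8::c9::c10::c11::c12::c13::c14::c15::t)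
        = (q ++ [c0,c1,c2,c3,c4,c5,c6,c7,c8,c9,c10,c11,c12,c13,c14,c15]) ++ t := by simp
    rw [hperm, hsrc, show ((16*a+16 : Nat) : Int) = ((16*(a+1) : Nat) : Int) by push_cast; ring]
    rw [ih (a+1) _ _ t (by simp; omega) (by simp; omega) ht]
    simp [pvG]
    omega

set_option maxHeartbeats 2000000 in
lemma bLoop (n : Nat) : ∀ (a : Nat) (q rest : List Char),
    q.length = 16*a → rest.length = 16*n →
    (PySem.List.pyRange (a:Int) ((a:Int)+(n:Int)) 1).flatMap
      (fun b => pvInv.map (fun i => PySem.List.pyGetD (q ++ rest) (16 * b + i) '*'))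
    = pvG rest := by
  induction n with
  | zero =>
    intro a q rest hq hr
    rw [List.length_eq_zero_iff] at hr
    subst hr
    rw [PySem.List.pyRange_one_eq_nil (by omega)]
    simp [pvG]
  | succ n ih =>
    intro a q rest hq hr
    obtain ⟨c0,c1,c2,c3,c4,c5,c6,c7,c8,c9,c10,c11,c12,c13,c14,c15,t, rfl, ht⟩ := chunk16 rest n hr
    rw [PySem.List.pyRange_one_cons (by push_cast; omega), List.flatMap_cons]
    rw [show (PySem.List.pyRange ((a:Int)+1) ((a:Int)+((n+1 : Nat) : Int)))
          = PySem.List.pyRange (((a+1 : Nat)) : Int) ((((a+1 : Nat)) : Int)+(n : Int)) by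
        push_cast; ring_nf]
    have hsrc : q ++ (c0::c1::c2::c3::c4::c5::c6::c7::c8::c9::c10::c11::c12::c13::c14::c15::t)
        = (q ++ [c0,c1,c2,c3,c4,c5,c6,c7,c8,c9,c10,c11,c12,c13,c14,c15]) ++ t := by simp
    rw [hsrc, ih (a+1) _ t (by simp; omega) ht]
    rw [← hsrc]
    rw [show ((16 : Int) * (a : Int)) = (q.length : Int) by rw [hq]; push_cast; ring]
    simp [pvInv, pvG, readApp]

lemma padLen_dvd (cs : List Char) :
    16 ∣ (if (PySem.Int.mod (cs.length : Int) 16) ≠ 0 then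
            cs ++ List.replicate (16 - (PySem.Int.mod (cs.length : Int) 16)).toNat '*'
          else cs).length := by
  have hm : PySem.Int.mod (cs.length : Int) 16 = ((cs.length % 16 : Nat) : Int) := by
    exact_mod_cast PySem.Int.mod_natCast cs.length 16
  by_cases hc : (PySem.Int.mod (cs.length : Int) 16) ≠ 0
  · rw [if_pos hc]
    simp only [List.length_append, List.length_replicate]
    rw [hm] at hc ⊢
    omega
  · rw [if_neg hc]
    rw [hm] at hc
    omega

theorem EncodeRotationCross_spec : Claim_equal_EncodeRotationCross := by
  intro msg _
  unfold Spec_EncodeRotationCross EncodeRotationCross EncodeRotationCross_alt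
  dsimp only
  obtain ⟨n, hn⟩ := padLen_dvd msg.toList
  set padded := (if (PySem.Int.mod ((msg.toList.length : Nat) : Int) 16) ≠ 0 then
      msg.toList ++ List.replicate (16 - (PySem.Int.mod ((msg.toList.length : Nat) : Int) 16)).toNat '*'
    else msg.toList) with hpad
  have hfd : PySem.Int.floordiv (padded.length : Int) 16 = ((n : Nat) : Int) := by
    have := PySem.Int.floordiv_natCast padded.length 16
    rw [show ((16 : Nat) : Int) = (16 : Int) by norm_num] at this
    rw [this]; congr 1; omega
  rw [hfd]
  have hA := aLoop n 0 [] [] padded (by simp) (by simp) (by omega)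
  simp only [List.nil_append, Nat.cast_zero, zero_add, Nat.zero_mul, Nat.mul_comm] at hA
  rw [hA]
  rw [PySem.List.foldl_pyRange_zero_pyGetD' (pvG padded) '*' (fun acc x => acc ++ [x]) []]
  rw [PySem.List.foldl_append_singleton]
  have hB := bLoop n 0 [] padded (by simp) (by omega)
  simp only [List.nil_append, Nat.cast_zero, zero_add] at hB
  rw [hB]
  simp
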